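-- pv_equiv track=rewrite | github.com/Crypto-TII/claasp | tests/unit/cipher_modules/models/sat/sat_models/sat_xor_differential_model_test.py | count_sequences_of_ones
-- ===== SOURCE A (Python) =====
-- def count_sequences_of_ones(data, full_window_size):
--     count = 0
--     for entry in data:
--         for binary_str in entry.values():
--             binary_str = binary_str[2:]  # Remove the '0b' prefix
--             sequences = binary_str.split("0")
--             for seq in sequences:
--                 if len(seq) >= full_window_size:
--                     count += len(seq) - full_window_size + 1  # Count overlapping sequences
--     return count
-- ===== SOURCE B (Python) =====
-- def count_sequences_of_ones(data, full_window_size):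
--     # Streaming scan: one pass per string with a run-length counter; a run is
--     # closed at every '0' and at end of string, contributing run-W+1 when long
--     # enough -- no intermediate segment list is allocated.
--     count = 0
--     for entry in data:
--         for binary_str in entry.values():
--             run = 0
--             for ch in binary_str[2:]:
--                 if ch == "0":
--                     if run >= full_window_size:
--                         count += run - full_window_size + 1
--                     run = 0
--                 else:
--                     run += 1
--             if run >= full_window_size:
--                 count += run - full_window_size + 1
--     return count
-- ===== Notes on version B (the rewrite author's own statement) =====
-- stated objective: alternative
-- what changed: Replaces split('0') plus a loop over the allocated segment list by a single character scan that keeps a run-length counter and closes a run at each '0' and at end of string.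
import Mathlib
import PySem

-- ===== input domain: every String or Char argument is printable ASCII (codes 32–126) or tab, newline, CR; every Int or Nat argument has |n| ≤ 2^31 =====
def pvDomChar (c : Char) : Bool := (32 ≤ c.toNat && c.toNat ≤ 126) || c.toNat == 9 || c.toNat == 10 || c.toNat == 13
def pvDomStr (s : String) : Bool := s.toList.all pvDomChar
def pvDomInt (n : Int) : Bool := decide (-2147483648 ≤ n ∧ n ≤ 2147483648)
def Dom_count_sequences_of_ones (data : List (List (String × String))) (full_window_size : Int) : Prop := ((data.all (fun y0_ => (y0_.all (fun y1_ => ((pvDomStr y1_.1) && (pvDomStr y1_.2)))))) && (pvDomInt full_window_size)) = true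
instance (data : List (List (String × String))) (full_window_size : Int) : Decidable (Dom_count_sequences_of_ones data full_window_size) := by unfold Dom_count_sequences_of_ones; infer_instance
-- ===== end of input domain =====

-- B replaces split('0') + a loop over the segment list by a single character scan
-- with a run-length counter (alternative decomposition, same asymptotic cost).

-- ===== PORT A =====
def count_sequences_of_ones (data : List (List (String × String))) (full_window_size : Int) : Int :=
  data.foldl (fun count entry =>
    ((PySem.Dict.ofList entry).values).foldl (fun count binary_str =>
      let bs := PySem.Chars.slice binary_str.toList (some 2) none   -- binary_str[2:]
      let sequences := PySem.Chars.splitOn bs ['0']                 -- binary_str.split("0")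
      sequences.foldl (fun count seq =>
        if (seq.length : Int) ≥ full_window_size then
          count + seq.length - full_window_size + 1
        else count) count) count) 0

-- ===== PORT B =====
def count_sequences_of_ones_alt (data : List (List (String × String))) (full_window_size : Int) : Int :=
  data.foldl (fun count entry =>
    ((PySem.Dict.ofList entry).values).foldl (fun count binary_str =>
      let p := (PySem.Chars.slice binary_str.toList (some 2) none).foldl
        (fun (p : Int × Int) ch =>
          if ch = '0' then
            (if p.2 ≥ full_window_size then p.1 + p.2 - full_window_size + 1 else p.1, 0)
          else (p.1, p.2 + 1)) (count, 0)
      if p.2 ≥ full_window_size then p.1 + p.2 - full_window_size + 1 else p.1) count) 0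

-- ===== PRECONDITION & SPEC =====
def Spec_count_sequences_of_ones (data : List (List (String × String))) (full_window_size : Int) (out : Int) : Prop := out = count_sequences_of_ones_alt data full_window_size
instance (data : List (List (String × String))) (full_window_size : Int) (out : Int) : Decidable (Spec_count_sequences_of_ones data full_window_size out) := by unfold Spec_count_sequences_of_ones; infer_instance

-- ===== CLAIM (what is proved, stated in full; the proofs are below) =====
def Claim_equal_count_sequences_of_ones : Prop := ∀ (data : List (List (String × String))) (full_window_size : Int), Dom_count_sequences_of_ones data full_window_size → Spec_count_sequences_of_ones data full_window_size (count_sequences_of_ones data full_window_size)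

-- ===== LEMMAS AND PROOFS =====

-- structural description of s.split("0") on char lists
def pvMySplit : List Char → List (List Char)
  | [] => [[]]
  | c :: rest =>
      if c = '0' then [] :: pvMySplit rest
      else
        match pvMySplit rest with
        | [] => [[c]]
        | h :: t => (c :: h) :: t

def pvConsPre (p : List Char) : List (List Char) → List (List Char)
  | [] => [p]
  | h :: t => (p ++ h) :: t

lemma pvMySplit_ne_nil (cs : List Char) : pvMySplit cs ≠ [] := by
  cases cs with
  | nil => simp [pvMySplit]
  | cons c rest =>
    simp only [pvMySplit]
    split_ifs
    · simp
    · cases h : pvMySplit rest <;> simp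

lemma pv_go_eq : ∀ (fuel : Nat) (l cur : List Char) (acc : List (List Char)),
    l.length < fuel →
    PySem.Chars.splitOn.go ['0'] fuel l cur acc = acc.reverse ++ pvConsPre cur.reverse (pvMySplit l) := by
  intro fuel
  induction fuel with
  | zero => intro l cur acc h; omega
  | succ n ih =>
    intro l cur acc h
    cases l with
    | nil =>
      simp [PySem.Chars.splitOn.go, pvMySplit, pvConsPre]
    | cons c rest =>
      by_cases hc : c = '0'
      · subst hc
        rw [show PySem.Chars.splitOn.go ['0'] (n+1) ('0' :: rest) cur acc
              = PySem.Chars.splitOn.go ['0'] n rest [] (cur.reverse :: acc) by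
            simp [PySem.Chars.splitOn.go, List.isPrefixOf]]
        rw [ih rest [] (cur.reverse :: acc) (by simpa using Nat.lt_of_succ_lt_succ h)]
        obtain ⟨hh, tt, hht⟩ := List.exists_cons_of_ne_nil (pvMySplit_ne_nil rest)
        simp [pvMySplit, pvConsPre, hht]
      · rw [show PySem.Chars.splitOn.go ['0'] (n+1) (c :: rest) cur acc
              = PySem.Chars.splitOn.go ['0'] n rest (c :: cur) acc by
            have hbc : ('0' == c) = false := by simp [Ne.symm hc]
            simp [PySem.Chars.splitOn.go, List.isPrefixOf, hbc]]
        rw [ih rest (c :: cur) acc (by simpa using Nat.lt_of_succ_lt_succ h)]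
        simp only [pvMySplit, if_neg hc]
        obtain ⟨hh, tt, hht⟩ := List.exists_cons_of_ne_nil (pvMySplit_ne_nil rest)
        rw [hht]
        simp [pvConsPre]

lemma pv_splitOn_eq (cs : List Char) : PySem.Chars.splitOn cs ['0'] = pvMySplit cs := by
  unfold PySem.Chars.splitOn
  rw [pv_go_eq (cs.length + 1) cs [] [] (by omega)]
  obtain ⟨hh, tt, hht⟩ := List.exists_cons_of_ne_nil (pvMySplit_ne_nil cs)
  rw [hht]; simp [pvConsPre]

def pvContrib (w n : Int) : Int := if n ≥ w then n - w + 1 else 0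

def pvSumA (w : Int) : List Char → Int → Int → Int
  | [], run, count => count + pvContrib w run
  | c :: rest, run, count =>
      if c = '0' then pvSumA w rest 0 (count + pvContrib w run)
      else pvSumA w rest (run + 1) count

lemma pv_close_eq (w count run : Int) :
    (if run ≥ w then count + run - w + 1 else count) = count + pvContrib w run := by
  unfold pvContrib; split_ifs <;> ring

lemma pv_stream_eq_sumA (w : Int) : ∀ (cs : List Char) (run count : Int),
    (let p := cs.foldl (fun (p : Int × Int) ch =>
        if ch = '0' then (if p.2 ≥ w then p.1 + p.2 - w + 1 else p.1, 0)
        else (p.1, p.2 + 1)) (count, run);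
      if p.2 ≥ w then p.1 + p.2 - w + 1 else p.1) = pvSumA w cs run count := by
  intro cs
  induction cs with
  | nil =>
    intro run count
    simpa [pvSumA] using pv_close_eq w count run
  | cons c rest ih =>
    intro run count
    by_cases hc : c = '0'
    · simp only [List.foldl_cons, hc, pvSumA]
      rw [show (if run ≥ w then count + run - w + 1 else count, (0 : Int))
            = (count + pvContrib w run, (0 : Int)) by rw [pv_close_eq]]
      exact ih 0 (count + pvContrib w run)
    · simp only [List.foldl_cons, if_neg hc, pvSumA]
      exact ih (run + 1) count

lemma pv_sumA_eq_foldA (w : Int) : ∀ (cs : List Char) (run count : Int),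
    pvSumA w cs run count =
      (match pvMySplit cs with
        | [] => count
        | h :: t => t.foldl (fun count seq =>
            if (seq.length : Int) ≥ w then count + seq.length - w + 1 else count)
            (count + pvContrib w (run + h.length))) := by
  intro cs
  induction cs with
  | nil => intro run count; simp [pvMySplit, pvSumA]
  | cons c rest ih =>
    intro run count
    by_cases hc : c = '0'
    · subst hc
      rw [show pvSumA w ('0' :: rest) run count = pvSumA w rest 0 (count + pvContrib w run) from by
        simp [pvSumA]]
      rw [ih 0 (count + pvContrib w run)]
      obtain ⟨hh, tt, hht⟩ := List.exists_cons_of_ne_nil (pvMySplit_ne_nil rest)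
      rw [show pvMySplit ('0' :: rest) = [] :: pvMySplit rest from by simp [pvMySplit]]
      rw [hht]
      simp only [List.foldl_cons]
      rw [pv_close_eq]
      norm_num
    · rw [show pvSumA w (c :: rest) run count = pvSumA w rest (run + 1) count from by
        simp [pvSumA, hc]]
      rw [ih (run + 1) count]
      obtain ⟨hh, tt, hht⟩ := List.exists_cons_of_ne_nil (pvMySplit_ne_nil rest)
      rw [show pvMySplit (c :: rest) = (c :: hh) :: tt from by simp [pvMySplit, hc, hht]]
      rw [hht]
      have harg : run + 1 + (hh.length : Int) = run + (((c :: hh).length : Nat) : Int) := by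
        simp only [List.length_cons]; push_cast; ring
      exact congrArg (fun z => List.foldl
        (fun (count : Int) (seq : List Char) =>
          if (seq.length : Int) ≥ w then count + seq.length - w + 1 else count)
        (count + pvContrib w z) tt) harg

lemma pv_per_string (w count : Int) (cs : List Char) :
    (PySem.Chars.splitOn cs ['0']).foldl (fun count seq =>
        if (seq.length : Int) ≥ w then count + seq.length - w + 1 else count) count =
    (let p := cs.foldl (fun (p : Int × Int) ch =>
        if ch = '0' then (if p.2 ≥ w then p.1 + p.2 - w + 1 else p.1, 0)
        else (p.1, p.2 + 1)) (count, 0);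
      if p.2 ≥ w then p.1 + p.2 - w + 1 else p.1) := by
  rw [pv_stream_eq_sumA, pv_sumA_eq_foldA, pv_splitOn_eq]
  obtain ⟨hh, tt, hht⟩ := List.exists_cons_of_ne_nil (pvMySplit_ne_nil cs)
  rw [hht]
  simp only [List.foldl_cons]
  rw [pv_close_eq]
  norm_num

-- ===== VERDICT (by name: the statement is the Claim_ definition above) =====
theorem count_sequences_of_ones_spec : Claim_equal_count_sequences_of_ones := by
  intro data w _
  unfold Spec_count_sequences_of_ones count_sequences_of_ones count_sequences_of_ones_alt
  congr 1
  funext count entry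
  congr 1
  funext count' bs
  simpa using pv_per_string w count' (PySem.Chars.slice bs.toList (some 2) none)
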